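-- pv_equiv track=rewrite | github.com/liuzhuoling2011/Poincare | pyagent/components/data_factory/data_loader.py | gather_quote_contract
-- ===== SOURCE A (Python) =====
-- def gather_quote_contract(symbols, exches, mi_types, org_products, sources, accounts):
--     all_market = False
--     parsed_contracts = []
--     query_quotes = []
--     key_set = set()
--     for idx in range(len(symbols)):
--         symbol = symbols[idx]
--         exch = exches[idx]
--         mi_type = mi_types[idx]
--         oproduct = org_products[idx]
--         source = sources[idx]
--         account = accounts[idx]
--         new_item = {'code': symbol, 'exch': exch, 'mi_type': mi_type, 'source': source, 'account': account}
--         str_key = str(new_item)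
--         if str_key not in key_set:
--             parsed_contracts.append(new_item)
--             if oproduct == 'HSA':
--                 if not all_market:
--                     query_quotes.append({'code': 'all', 'exch': None, 'mi_type': mi_type, 'source': source})
--                     all_market = True
--             else:
--                 query_quotes.append(new_item)
--             key_set.add(str_key)
--     return parsed_contracts, query_quotes
-- ===== SOURCE B (Python) =====
-- def gather_quote_contract(symbols, exches, mi_types, org_products, sources, accounts):
--     # Pass 1: build the per-row dicts, dedupe by the value tuple (equivalent to
--     # str(dict) with this fixed key order), keeping each survivor's org_product.
--     seen = set()
--     survivors = []
--     for symbol, exch, mi_type, oproduct, source, account in zip(symbols, exches, mi_types, org_products, sources, accounts):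
--         key = (symbol, exch, mi_type, source, account)
--         if key not in seen:
--             seen.add(key)
--             survivors.append(({'code': symbol, 'exch': exch, 'mi_type': mi_type,
--                                'source': source, 'account': account}, oproduct))
--     parsed_contracts = [item for item, _ in survivors]
--     # Pass 2: quotes are the non-HSA survivors; if any survivor is HSA, a single
--     # all-market quote is inserted at the first HSA survivor's slot.
--     query_quotes = [item for item, op in survivors if op != 'HSA']
--     for i, (item, op) in enumerate(survivors):
--         if op == 'HSA':
--             query_quotes.insert(i, {'code': 'all', 'exch': None,
--                                     'mi_type': item['mi_type'], 'source': item['source']})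
--             break
--     return parsed_contracts, query_quotes
-- ===== Notes on version B (the rewrite author's own statement) =====
-- stated objective: alternative
-- what changed: A's single combined loop (dedupe + conditional quote building with an all_market flag) is split into two differently-shaped passes: a zip-based dedupe pass that collects surviving (contract, org_product) pairs keyed by the value tuple, then comprehension-style passes that rebuild parsed_contracts and query_quotes, inserting the single all-market quote at the first HSA survivor's position.
import Mathlib
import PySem

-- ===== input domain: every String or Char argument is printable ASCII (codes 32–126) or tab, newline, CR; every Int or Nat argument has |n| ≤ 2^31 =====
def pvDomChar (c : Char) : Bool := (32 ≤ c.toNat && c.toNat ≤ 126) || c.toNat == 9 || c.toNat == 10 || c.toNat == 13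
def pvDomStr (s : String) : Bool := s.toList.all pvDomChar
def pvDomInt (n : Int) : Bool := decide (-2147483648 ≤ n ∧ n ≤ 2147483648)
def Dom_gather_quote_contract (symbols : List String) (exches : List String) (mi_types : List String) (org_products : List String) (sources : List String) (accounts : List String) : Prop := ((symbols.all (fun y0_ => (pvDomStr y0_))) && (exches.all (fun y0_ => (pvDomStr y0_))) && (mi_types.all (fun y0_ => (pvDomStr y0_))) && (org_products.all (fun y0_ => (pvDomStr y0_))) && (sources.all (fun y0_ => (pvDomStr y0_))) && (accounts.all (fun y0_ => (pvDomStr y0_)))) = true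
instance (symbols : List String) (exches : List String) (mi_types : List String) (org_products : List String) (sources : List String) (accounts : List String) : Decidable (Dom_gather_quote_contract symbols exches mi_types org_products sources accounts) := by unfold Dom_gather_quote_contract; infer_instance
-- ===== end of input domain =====

-- B replaces A's single combined loop by two passes: a zip-dedupe pass collecting the surviving
-- (contract, org_product) pairs, then comprehension-style passes that rebuild both result lists,
-- inserting the single all-market quote at the first HSA survivor's slot (objective: alternative).

-- ===== PORT A =====
-- the dict {'code': symbol, 'exch': exch, 'mi_type': mi_type, 'source': source, 'account': account}
def pvItem (symbol exch mi_type source account : String) : List (String × Option String) :=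
  [("code", some symbol), ("exch", some exch), ("mi_type", some mi_type),
   ("source", some source), ("account", some account)]

-- the dict {'code': 'all', 'exch': None, 'mi_type': mi_type, 'source': source}
def pvAllItem (mi_type source : String) : List (String × Option String) :=
  [("code", some "all"), ("exch", none), ("mi_type", some mi_type), ("source", some source)]

-- one iteration of A's loop, state = (all_market, parsed_contracts, query_quotes, key_set).
-- str(new_item) is injective on these fixed-key, string-valued dicts (repr of a str is an
-- unambiguous literal), so the set of str keys is modeled exactly by the set of the dicts themselves.
def gqcStepA (symbols exches mi_types org_products sources accounts : List String)
    (st : Bool × List (List (String × Option String)) × List (List (String × Option String)) ×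
          PySem.Set (List (String × Option String))) (idx : Int) :
    Bool × List (List (String × Option String)) × List (List (String × Option String)) ×
    PySem.Set (List (String × Option String)) :=
  -- pyGetD "" is exact under Pre_ (every index drawn from range(len(symbols)) is in range)
  let symbol := PySem.List.pyGetD symbols idx ""
  let exch := PySem.List.pyGetD exches idx ""
  let mi_type := PySem.List.pyGetD mi_types idx ""
  let oproduct := PySem.List.pyGetD org_products idx ""
  let source := PySem.List.pyGetD sources idx ""
  let account := PySem.List.pyGetD accounts idx ""
  let new_item := pvItem symbol exch mi_type source account
  if PySem.Set.contains st.2.2.2 new_item then st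
  else
    let parsed := st.2.1 ++ [new_item]
    if oproduct == "HSA" then
      if st.1 then (st.1, parsed, st.2.2.1, PySem.Set.add st.2.2.2 new_item)
      else (true, parsed, st.2.2.1 ++ [pvAllItem mi_type source], PySem.Set.add st.2.2.2 new_item)
    else (st.1, parsed, st.2.2.1 ++ [new_item], PySem.Set.add st.2.2.2 new_item)

def gather_quote_contract (symbols : List String) (exches : List String) (mi_types : List String) (org_products : List String) (sources : List String) (accounts : List String) : (List (List (String × Option String))) × (List (List (String × Option String))) :=
  let fin := (PySem.List.pyRange 0 (symbols.length : Int) 1).foldl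
    (gqcStepA symbols exches mi_types org_products sources accounts)
    (false, [], [], PySem.Set.empty)
  (fin.2.1, fin.2.2.1)

-- ===== PORT B =====
-- pass-1 step: dedupe by the value tuple, keep (contract dict, org_product) for each survivor
def gqcStepB
    (st : PySem.Set (String × String × String × String × String) ×
          List (List (String × Option String) × String))
    (r : String × String × String × String × String × String) :
    PySem.Set (String × String × String × String × String) ×
    List (List (String × Option String) × String) :=
  let (symbol, exch, mi_type, oproduct, source, account) := r
  let key := (symbol, exch, mi_type, source, account)
  if PySem.Set.contains st.1 key then st
  else (PySem.Set.add st.1 key, st.2 ++ [(pvItem symbol exch mi_type source account, oproduct)])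

-- the all-market dict built from a survivor's item (item['mi_type'], item['source'])
def gqcMkAll (it : List (String × Option String)) : List (String × Option String) :=
  [("code", some "all"), ("exch", none),
   ("mi_type", (PySem.Dict.mk it).getD "mi_type" none),
   ("source", (PySem.Dict.mk it).getD "source" none)]

-- the 'for i, (item, op) in enumerate(survivors): if op == 'HSA': … break' scan
def gqcFindHsa (i : Nat) : List (List (String × Option String) × String) →
    Option (Nat × List (String × Option String))
  | [] => none
  | (it, op) :: rest => if op == "HSA" then some (i, it) else gqcFindHsa (i + 1) rest

def gather_quote_contract_alt (symbols : List String) (exches : List String) (mi_types : List String) (org_products : List String) (sources : List String) (accounts : List String) : (List (List (String × Option String))) × (List (List (String × Option String))) :=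
  let rows := symbols.zip (exches.zip (mi_types.zip (org_products.zip (sources.zip accounts))))
  let survivors := (rows.foldl gqcStepB (PySem.Set.empty, [])).2
  let parsed_contracts := survivors.map (fun p => p.1)
  let quotes0 := (survivors.filter (fun p => !(p.2 == "HSA"))).map (fun p => p.1)
  let query_quotes :=
    match gqcFindHsa 0 survivors with
    | none => quotes0
    | some (i, it) => PySem.List.insert quotes0 (i : Int) (gqcMkAll it)
  (parsed_contracts, query_quotes)

-- ===== PRECONDITION & SPEC =====
-- Pre_ excludes exactly the inputs where A raises IndexError: some index < len(symbols)
-- is out of range for one of the other five lists.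
def Pre_gather_quote_contract (symbols : List String) (exches : List String) (mi_types : List String) (org_products : List String) (sources : List String) (accounts : List String) : Prop :=
  symbols.length ≤ exches.length ∧ symbols.length ≤ mi_types.length ∧
  symbols.length ≤ org_products.length ∧ symbols.length ≤ sources.length ∧
  symbols.length ≤ accounts.length
instance (symbols : List String) (exches : List String) (mi_types : List String) (org_products : List String) (sources : List String) (accounts : List String) : Decidable (Pre_gather_quote_contract symbols exches mi_types org_products sources accounts) := by unfold Pre_gather_quote_contract; infer_instance

def pvWitness_gather_quote_contract : List String × List String × List String × List String × List String × List String :=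
  (["IF2301", "IF2301"], ["CFFEX", "CFFEX"], ["F", "F"], ["HSA", "HSA"], ["ctp", "ctp"], ["a1", "a1"])

def Spec_gather_quote_contract (symbols : List String) (exches : List String) (mi_types : List String) (org_products : List String) (sources : List String) (accounts : List String) (out : (List (List (String × Option String))) × (List (List (String × Option String)))) : Prop := out = gather_quote_contract_alt symbols exches mi_types org_products sources accounts
instance (symbols : List String) (exches : List String) (mi_types : List String) (org_products : List String) (sources : List String) (accounts : List String) (out : (List (List (String × Option String))) × (List (List (String × Option String)))) : Decidable (Spec_gather_quote_contract symbols exches mi_types org_products sources accounts out) := by unfold Spec_gather_quote_contract; infer_instance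

-- ===== CLAIM (what is proved, stated in full; the proofs are below) =====
def Claim_equal_gather_quote_contract : Prop := ∀ (symbols : List String) (exches : List String) (mi_types : List String) (org_products : List String) (sources : List String) (accounts : List String), Dom_gather_quote_contract symbols exches mi_types org_products sources accounts → Pre_gather_quote_contract symbols exches mi_types org_products sources accounts → Spec_gather_quote_contract symbols exches mi_types org_products sources accounts (gather_quote_contract symbols exches mi_types org_products sources accounts)

-- ===== LEMMAS AND PROOFS =====

-- A row of values, and A's step re-expressed on a row (proof-only helpers)
abbrev gqcRowT := String × String × String × String × String × String

def gqcStepRow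
    (st : Bool × List (List (String × Option String)) × List (List (String × Option String)) ×
          PySem.Set (List (String × Option String))) (r : gqcRowT) :
    Bool × List (List (String × Option String)) × List (List (String × Option String)) ×
    PySem.Set (List (String × Option String)) :=
  let (symbol, exch, mi_type, oproduct, source, account) := r
  let new_item := pvItem symbol exch mi_type source account
  if PySem.Set.contains st.2.2.2 new_item then st
  else
    let parsed := st.2.1 ++ [new_item]
    if oproduct == "HSA" then
      if st.1 then (st.1, parsed, st.2.2.1, PySem.Set.add st.2.2.2 new_item)
      else (true, parsed, st.2.2.1 ++ [pvAllItem mi_type source], PySem.Set.add st.2.2.2 new_item)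
    else (st.1, parsed, st.2.2.1 ++ [new_item], PySem.Set.add st.2.2.2 new_item)

-- key → item
def gqcIk (k : String × String × String × String × String) : List (String × Option String) :=
  pvItem k.1 k.2.1 k.2.2.1 k.2.2.2.1 k.2.2.2.2

def gqcNonHSA (sv : List (List (String × Option String) × String)) : List (List (String × Option String)) :=
  (sv.filter (fun p => !(p.2 == "HSA"))).map (fun p => p.1)

def gqcInsertAll : List (List (String × Option String) × String) → List (List (String × Option String))
  | [] => []
  | (it, op) :: rest => if op == "HSA" then gqcMkAll it :: gqcNonHSA rest else it :: gqcInsertAll rest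

def gqcQ (am : Bool) (sv : List (List (String × Option String) × String)) :
    List (List (String × Option String)) :=
  if am then gqcNonHSA sv else gqcInsertAll sv


lemma pvItem_inj {s e m src a s' e' m' src' a' : String}
    (h : pvItem s e m src a = pvItem s' e' m' src' a') :
    s = s' ∧ e = e' ∧ m = m' ∧ src = src' ∧ a = a' := by
  simp [pvItem] at h; tauto

lemma mem_map_gqcIk {seen : List (String × String × String × String × String)}
    {k : String × String × String × String × String} :
    gqcIk k ∈ seen.map gqcIk ↔ k ∈ seen := by
  constructor
  · intro h
    rcases List.mem_map.1 h with ⟨k', hk', he⟩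
    obtain ⟨k1,k2,k3,k4,k5⟩ := k
    obtain ⟨k1',k2',k3',k4',k5'⟩ := k'
    obtain ⟨h1,h2,h3,h4,h5⟩ := pvItem_inj he
    subst h1; subst h2; subst h3; subst h4; subst h5; exact hk'
  · exact fun h => List.mem_map_of_mem h

lemma contains_map_gqcIk (seen : PySem.Set (String × String × String × String × String))
    (k : String × String × String × String × String) :
    PySem.Set.contains (seen.map gqcIk) (gqcIk k) = PySem.Set.contains seen k := by
  rw [Bool.eq_iff_iff]
  simp only [PySem.Set.contains_iff]
  exact mem_map_gqcIk

lemma add_map_gqcIk (seen : PySem.Set (String × String × String × String × String))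
    (k : String × String × String × String × String) :
    PySem.Set.add (seen.map gqcIk) (gqcIk k) = (PySem.Set.add seen k).map gqcIk := by
  rw [PySem.Set.add_eq_ite, PySem.Set.add_eq_ite]
  by_cases h : k ∈ seen
  · rw [if_pos h, if_pos (mem_map_gqcIk.2 h)]
  · rw [if_neg (fun hc => h (mem_map_gqcIk.1 hc)), if_neg h, List.map_append]
    simp

lemma mkAll_pvItem (s e m src a : String) :
    gqcMkAll (pvItem s e m src a) = pvAllItem m src := by
  rfl

lemma nonHSA_cons_hsa {op : String} (h : (op == "HSA") = true)
    (it : List (String × Option String)) (sv : List (List (String × Option String) × String)) :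
    gqcNonHSA ((it, op) :: sv) = gqcNonHSA sv := by
  simp [gqcNonHSA, h]

lemma nonHSA_cons_ne {op : String} (h : (op == "HSA") = false)
    (it : List (String × Option String)) (sv : List (List (String × Option String) × String)) :
    gqcNonHSA ((it, op) :: sv) = it :: gqcNonHSA sv := by
  simp [gqcNonHSA, h]

lemma gqcQ_cons_ne {op : String} (h : (op == "HSA") = false) (am : Bool)
    (it : List (String × Option String)) (sv : List (List (String × Option String) × String)) :
    gqcQ am ((it, op) :: sv) = it :: gqcQ am sv := by
  cases am <;> simp [gqcQ, gqcInsertAll, nonHSA_cons_ne h, h]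

lemma insertAll_cons_hsa {op : String} (h : (op == "HSA") = true)
    (it : List (String × Option String)) (sv : List (List (String × Option String) × String)) :
    gqcInsertAll ((it, op) :: sv) = gqcMkAll it :: gqcNonHSA sv := by
  simp [gqcInsertAll, h]

lemma stepB_acc : ∀ (rows : List gqcRowT)
    (seen : PySem.Set (String × String × String × String × String))
    (sv : List (List (String × Option String) × String)),
    rows.foldl gqcStepB (seen, sv)
      = ((rows.foldl gqcStepB (seen, [])).1, sv ++ (rows.foldl gqcStepB (seen, [])).2) := by
  intro rows
  induction rows with
  | nil => intro seen sv; simp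
  | cons r rest ih =>
    intro seen sv
    obtain ⟨s, e, m, o, src, a⟩ := r
    simp only [List.foldl_cons, gqcStepB]
    by_cases hc : PySem.Set.contains seen (s, e, m, src, a) = true
    · simp only [hc, if_true]
      exact ih seen sv
    · simp only [Bool.not_eq_true] at hc
      simp only [hc, Bool.false_eq_true, if_false, List.nil_append]
      rw [ih _ (sv ++ [(pvItem s e m src a, o)]), ih _ ([(pvItem s e m src a, o)])]
      simp [List.append_assoc]

lemma mainA : ∀ (rows : List gqcRowT)
    (seen : PySem.Set (String × String × String × String × String))
    (am : Bool) (parsed quotes : List (List (String × Option String))),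
    rows.foldl gqcStepRow (am, parsed, quotes, seen.map gqcIk)
      = ((am || (rows.foldl gqcStepB (seen, [])).2.any (fun p => p.2 == "HSA")),
         parsed ++ ((rows.foldl gqcStepB (seen, [])).2.map (fun p => p.1)),
         quotes ++ gqcQ am (rows.foldl gqcStepB (seen, [])).2,
         ((rows.foldl gqcStepB (seen, [])).1.map gqcIk)) := by
  intro rows
  induction rows with
  | nil =>
    intro seen am parsed quotes
    cases am <;> simp [gqcQ, gqcNonHSA, gqcInsertAll]
  | cons r rest ih =>
    intro seen am parsed quotes
    obtain ⟨s, e, m, o, src, a⟩ := r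
    have hck := contains_map_gqcIk seen (s, e, m, src, a)
    have hadd := add_map_gqcIk seen (s, e, m, src, a)
    simp only [gqcIk] at hck hadd
    simp only [List.foldl_cons, gqcStepRow, gqcStepB]
    by_cases hc : PySem.Set.contains seen (s, e, m, src, a) = true
    · simp only [hck, hc, if_true]
      exact ih seen am parsed quotes
    · simp only [Bool.not_eq_true] at hc
      simp only [hck, hc, Bool.false_eq_true, if_false, List.nil_append]
      rw [stepB_acc rest (PySem.Set.add seen (s, e, m, src, a)) [(pvItem s e m src a, o)]]
      by_cases ho : (o == "HSA") = true
      · cases am with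
        | true =>
          simp only [ho, if_true]
          rw [hadd, ih]
          simp [gqcQ, nonHSA_cons_hsa ho, List.append_assoc, ho]
        | false =>
          simp only [ho, if_true, Bool.false_eq_true, if_false]
          rw [hadd, ih]
          simp only [gqcQ, if_true, Bool.false_eq_true, if_false,
            List.any_cons, ho, Bool.true_or, Bool.or_true, List.map_cons,
            insertAll_cons_hsa ho, mkAll_pvItem, List.append_assoc, List.cons_append,
            List.nil_append]
      · simp only [Bool.not_eq_true] at ho
        simp only [ho, Bool.false_eq_true, if_false]
        rw [hadd, ih]
        simp [gqcQ_cons_ne ho, List.append_assoc, ho]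

lemma findHsa_shift : ∀ (sv : List (List (String × Option String) × String)) (k : Nat),
    gqcFindHsa (k + 1) sv = (gqcFindHsa k sv).map (fun p => (p.1 + 1, p.2)) := by
  intro sv
  induction sv with
  | nil => intro k; simp [gqcFindHsa]
  | cons p rest ih =>
    intro k
    obtain ⟨it, op⟩ := p
    by_cases h : (op == "HSA") = true
    · simp [gqcFindHsa, h]
    · simp only [Bool.not_eq_true] at h
      simp [gqcFindHsa, h, ih]

lemma findHsa_none : ∀ (sv : List (List (String × Option String) × String)),
    gqcFindHsa 0 sv = none → gqcInsertAll sv = gqcNonHSA sv := by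
  intro sv
  induction sv with
  | nil => intro _; rfl
  | cons p rest ih =>
    intro h
    obtain ⟨it, op⟩ := p
    by_cases ho : (op == "HSA") = true
    · simp [gqcFindHsa, ho] at h
    · simp only [Bool.not_eq_true] at ho
      simp only [gqcFindHsa, ho, Bool.false_eq_true, if_false] at h
      rw [findHsa_shift rest 0] at h
      have h0 : gqcFindHsa 0 rest = none := by
        rcases hx : gqcFindHsa 0 rest with _ | ⟨j, it'⟩
        · rfl
        · rw [hx] at h; simp at h
      simp [gqcInsertAll, nonHSA_cons_ne ho, ho, ih h0]

lemma findHsa_le : ∀ (sv : List (List (String × Option String) × String)) (i : Nat)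
    (it : List (String × Option String)), gqcFindHsa 0 sv = some (i, it) →
    i ≤ (gqcNonHSA sv).length := by
  intro sv
  induction sv with
  | nil => intro i it h; simp [gqcFindHsa] at h
  | cons p rest ih =>
    intro i it h
    obtain ⟨it0, op⟩ := p
    by_cases ho : (op == "HSA") = true
    · simp [gqcFindHsa, ho] at h
      obtain ⟨h1, h2⟩ := h
      omega
    · simp only [Bool.not_eq_true] at ho
      simp only [gqcFindHsa, ho, Bool.false_eq_true, if_false] at h
      rw [findHsa_shift rest 0] at h
      rcases hx : gqcFindHsa 0 rest with _ | ⟨j, it'⟩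
      · rw [hx] at h; simp at h
      · rw [hx] at h; simp at h
        obtain ⟨hj, -⟩ := h
        have := ih j it' hx
        rw [nonHSA_cons_ne ho]
        simp only [List.length_cons]
        omega

lemma findHsa_some : ∀ (sv : List (List (String × Option String) × String)) (i : Nat)
    (it : List (String × Option String)), gqcFindHsa 0 sv = some (i, it) →
    PySem.List.insert (gqcNonHSA sv) (i : Int) (gqcMkAll it) = gqcInsertAll sv := by
  intro sv
  induction sv with
  | nil => intro i it h; simp [gqcFindHsa] at h
  | cons p rest ih =>
    intro i it h
    obtain ⟨it0, op⟩ := p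
    by_cases ho : (op == "HSA") = true
    · simp [gqcFindHsa, ho] at h
      obtain ⟨h1, h2⟩ := h
      subst h2
      have h1' : i = 0 := by omega
      subst h1'
      rw [nonHSA_cons_hsa ho, insertAll_cons_hsa ho]
      simp [PySem.List.insert_zero]
    · simp only [Bool.not_eq_true] at ho
      simp only [gqcFindHsa, ho, Bool.false_eq_true, if_false] at h
      rw [findHsa_shift rest 0] at h
      rcases hx : gqcFindHsa 0 rest with _ | ⟨j, it'⟩
      · rw [hx] at h; simp at h
      · rw [hx] at h; simp at h
        obtain ⟨hj, hit⟩ := h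
        subst hit
        have hle := findHsa_le rest j it' hx
        have hj' : i = j + 1 := by omega
        subst hj'
        rw [nonHSA_cons_ne ho]
        rw [show gqcInsertAll ((it0, op) :: rest) = it0 :: gqcInsertAll rest by
          simp [gqcInsertAll, ho]]
        rw [← ih j it' hx]
        rw [PySem.List.insert_natCast _ (j + 1) _ (by simp [List.length_cons]; omega),
            PySem.List.insert_natCast _ j _ hle]
        simp [List.take_succ_cons, List.drop_succ_cons]

lemma foldl_range_zip : ∀ (n : Nat) (symbols exches mi_types org_products sources accounts : List String)
    (_ : n ≤ symbols.length) (_ : n ≤ exches.length) (_ : n ≤ mi_types.length)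
    (_ : n ≤ org_products.length) (_ : n ≤ sources.length) (_ : n ≤ accounts.length)
    (init : Bool × List (List (String × Option String)) × List (List (String × Option String)) ×
            PySem.Set (List (String × Option String))),
    (List.range n).foldl
        (fun st (i : Nat) => gqcStepA symbols exches mi_types org_products sources accounts st (i : Int)) init
      = ((symbols.zip (exches.zip (mi_types.zip (org_products.zip (sources.zip accounts))))).take n).foldl
          gqcStepRow init := by
  intro n
  induction n with
  | zero => intros; simp
  | succ n ih =>
    intro s e m o src a h1 h2 h3 h4 h5 h6 init
    have hn1 : n < s.length := by omega
    have hn2 : n < e.length := by omega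
    have hn3 : n < m.length := by omega
    have hn4 : n < o.length := by omega
    have hn5 : n < src.length := by omega
    have hn6 : n < a.length := by omega
    rw [List.range_succ, List.take_add_one]
    simp only [List.foldl_append]
    have hz : (s.zip (e.zip (m.zip (o.zip (src.zip a)))))[n]?
        = some (s[n], e[n], m[n], o[n], src[n], a[n]) := by
      have hlen : n < (s.zip (e.zip (m.zip (o.zip (src.zip a))))).length := by
        simp [List.length_zip]; omega
      rw [List.getElem?_eq_getElem hlen]
      simp [List.getElem_zip]
    rw [hz]
    rw [ih s e m o src a (by omega) (by omega) (by omega) (by omega) (by omega) (by omega) init]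
    simp only [Option.toList_some, List.foldl_cons, List.foldl_nil]
    have hstep : ∀ st, gqcStepA s e m o src a st ((n : Nat) : Int)
        = gqcStepRow st (s[n], e[n], m[n], o[n], src[n], a[n]) := by
      intro st
      simp only [gqcStepA, gqcStepRow, PySem.List.pyGetD_natCast,
        List.getD_eq_getElem s "" hn1, List.getD_eq_getElem e "" hn2,
        List.getD_eq_getElem m "" hn3, List.getD_eq_getElem o "" hn4,
        List.getD_eq_getElem src "" hn5, List.getD_eq_getElem a "" hn6]
    rw [hstep]

lemma idx_eq_rows (symbols exches mi_types org_products sources accounts : List String)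
    (hp : Pre_gather_quote_contract symbols exches mi_types org_products sources accounts)
    (init : Bool × List (List (String × Option String)) × List (List (String × Option String)) ×
            PySem.Set (List (String × Option String))) :
    (PySem.List.pyRange 0 (symbols.length : Int) 1).foldl
        (gqcStepA symbols exches mi_types org_products sources accounts) init
      = (symbols.zip (exches.zip (mi_types.zip (org_products.zip (sources.zip accounts))))).foldl
          gqcStepRow init := by
  obtain ⟨p1, p2, p3, p4, p5⟩ := hp
  rw [PySem.List.pyRange_zero_natCast, List.foldl_map]
  rw [foldl_range_zip symbols.length symbols exches mi_types org_products sources accounts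
      le_rfl p1 p2 p3 p4 p5 init]
  congr 1
  apply List.take_of_length_le
  simp [List.length_zip]

-- ===== VERDICT (by name: the statement is the Claim_ definition above) =====
theorem gather_quote_contract_spec : Claim_equal_gather_quote_contract := by
  intro symbols exches mi_types org_products sources accounts _ hp
  unfold Spec_gather_quote_contract
  simp only [gather_quote_contract, gather_quote_contract_alt, PySem.Set.empty]
  rw [idx_eq_rows symbols exches mi_types org_products sources accounts hp]
  have h := mainA (symbols.zip (exches.zip (mi_types.zip (org_products.zip (sources.zip accounts)))))
      [] false [] []
  simp only [List.map_nil, List.nil_append] at h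
  rw [h]
  refine Prod.ext rfl ?_
  show gqcQ false _ = _
  rcases hh : gqcFindHsa 0 ((List.foldl gqcStepB ([], [])
      (symbols.zip (exches.zip (mi_types.zip (org_products.zip (sources.zip accounts)))))).2)
    with _ | ⟨i, it⟩
  · simp only [gqcQ, Bool.false_eq_true, if_false]
    rw [findHsa_none _ hh]
    rfl
  · simp only [gqcQ, Bool.false_eq_true, if_false]
    rw [← findHsa_some _ i it hh]
    rfl
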